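-- pv_equiv track=rewrite | github.com/Lukas-Thai/Projet-Python-LUC | Algorithme de LUC.py | suite_de_lucas
-- ===== SOURCE A (Python) =====
-- def suite_de_lucas(e,p,N):
--     liste={0:2,1:p}
--     for i in range(e+1):
--         if i not in liste.keys():
--             liste[i]=(p*liste[i-1]-liste[i-2])%N
--         if i>3:
--             del liste[i-3]
--     return liste[e]%N
-- ===== SOURCE B (Python) =====
-- def suite_de_lucas(e, p, N):
--     # Fast doubling on the Lucas sequence V_0=2, V_1=p, V_k = p*V_{k-1} - V_{k-2}
--     # using V_{2k} = V_k^2 - 2 and V_{2k+1} = V_k*V_{k+1} - p  (Q = 1), all mod N.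
--     def vv(k):  # returns (V_k % N, V_{k+1} % N)
--         if k == 0:
--             return 2 % N, p % N
--         a, b = vv(k // 2)
--         if k % 2:
--             return (a * b - p) % N, (b * b - 2) % N
--         else:
--             return (a * a - 2) % N, (a * b - p) % N
--     return vv(e)[0]
-- ===== Notes on version B (the rewrite author's own statement) =====
-- stated objective: faster
-- what changed: A iterates the recurrence V_i = p*V_{i-1} - V_{i-2} (mod N) one index at a time in a sliding-window dict; B computes V_e mod N directly by Lucas-sequence fast doubling (V_2k = V_k^2 - 2, V_2k+1 = V_k*V_{k+1} - p, Q = 1), recursing on e//2.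
import Mathlib
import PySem

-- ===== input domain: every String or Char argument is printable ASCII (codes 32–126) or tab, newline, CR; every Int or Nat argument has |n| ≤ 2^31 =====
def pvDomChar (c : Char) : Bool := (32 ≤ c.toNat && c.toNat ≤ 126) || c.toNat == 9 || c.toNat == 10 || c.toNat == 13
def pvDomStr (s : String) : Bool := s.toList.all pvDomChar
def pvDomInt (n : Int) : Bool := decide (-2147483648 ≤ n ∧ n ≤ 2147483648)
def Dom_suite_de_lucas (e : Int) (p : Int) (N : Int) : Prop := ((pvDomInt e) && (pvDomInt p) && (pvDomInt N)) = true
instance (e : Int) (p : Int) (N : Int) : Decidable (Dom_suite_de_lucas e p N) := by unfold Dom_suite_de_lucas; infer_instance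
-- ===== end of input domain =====

-- B replaces A's linear sliding-window recurrence loop by Lucas-sequence fast doubling
-- (V_{2k} = V_k^2 - 2, V_{2k+1} = V_k V_{k+1} - p, all mod N): O(log e) steps instead of O(e).

-- ===== PORT A =====
-- one iteration of A's 'for i in range(e+1)' body over the dict 'liste'
def pvBodyA (p N : Int) (d : PySem.Dict Int Int) (i : Int) : PySem.Dict Int Int :=
  let d1 := if d.contains i then d
            else d.insert i (PySem.Int.mod (p * d.getD (i - 1) 0 - d.getD (i - 2) 0) N)
  if 3 < i then d1.erase (i - 3) else d1

def suite_de_lucas (e : Int) (p : Int) (N : Int) : Int :=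
  -- liste = {0: 2, 1: p}
  let d0 : PySem.Dict Int Int := (PySem.Dict.empty.insert 0 2).insert 1 p
  let d := (PySem.List.pyRange 0 (e + 1) 1).foldl (pvBodyA p N) d0
  -- liste[e] % N; liste[e] raises KeyError exactly when e < 0 (excluded by Pre_), so getD's default is never read
  PySem.Int.mod (d.getD e 0) N

-- ===== PORT B =====
-- Source B's recursive helper vv(k) = (V_k % N, V_{k+1} % N); Python recurses on an int k with k//2 and
-- k%2, which for k ≥ 0 (guaranteed by Pre_, entered via e.toNat below) agree with Nat division by 2
def pvVV (p N : Int) : Nat → Int × Int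
  | 0 => (PySem.Int.mod 2 N, PySem.Int.mod p N)
  | (k + 1) =>
    let ab := pvVV p N ((k + 1) / 2)
    if (k + 1) % 2 = 1 then
      (PySem.Int.mod (ab.1 * ab.2 - p) N, PySem.Int.mod (ab.2 * ab.2 - 2) N)
    else
      (PySem.Int.mod (ab.1 * ab.1 - 2) N, PySem.Int.mod (ab.1 * ab.2 - p) N)
  decreasing_by exact Nat.div_lt_self (Nat.succ_pos k) one_lt_two

def suite_de_lucas_alt (e : Int) (p : Int) (N : Int) : Int :=
  (pvVV p N e.toNat).1

-- ===== PRECONDITION & SPEC =====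
-- Pre_: the Python A raises KeyError for e < 0 (liste[e] looks up a missing key)
-- and ZeroDivisionError for N = 0 (the '% N'); on everything else it returns.
def Pre_suite_de_lucas (e : Int) (p : Int) (N : Int) : Prop := 0 ≤ e ∧ N ≠ 0
instance (e : Int) (p : Int) (N : Int) : Decidable (Pre_suite_de_lucas e p N) := by unfold Pre_suite_de_lucas; infer_instance
def pvWitness_suite_de_lucas : Int × Int × Int := (7, 3, 10)

def Spec_suite_de_lucas (e : Int) (p : Int) (N : Int) (out : Int) : Prop := out = suite_de_lucas_alt e p N
instance (e : Int) (p : Int) (N : Int) (out : Int) : Decidable (Spec_suite_de_lucas e p N out) := by unfold Spec_suite_de_lucas; infer_instance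

-- ===== CLAIM (what is proved, stated in full; the proofs are below) =====
def Claim_equal_suite_de_lucas : Prop := ∀ (e : Int) (p : Int) (N : Int), Dom_suite_de_lucas e p N → Pre_suite_de_lucas e p N → Spec_suite_de_lucas e p N (suite_de_lucas e p N)

-- ===== LEMMAS AND PROOFS =====

-- the mathematical Lucas sequence V_0 = 2, V_1 = p, V_{n+2} = p V_{n+1} - V_n
def lucV (p : Int) : Nat → Int
  | 0 => 2
  | 1 => p
  | (n + 2) => p * lucV p (n + 1) - lucV p n

-- the values A's dict actually stores: reduced mod N from index 2 on
def lucW (p N : Int) : Nat → Int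
  | 0 => 2
  | 1 => p
  | (n + 2) => PySem.Int.mod (p * lucW p N (n + 1) - lucW p N n) N

lemma lucV_step (p : Int) (n : Nat) : lucV p (n + 2) = p * lucV p (n + 1) - lucV p n := rfl
lemma lucW_step (p N : Int) (n : Nat) : lucW p N (n + 2) = PySem.Int.mod (p * lucW p N (n + 1) - lucW p N n) N := rfl

-- ------- Python-mod congruence toolkit -------
lemma pymod_sub_dvd (a b : Int) : b ∣ (a - PySem.Int.mod a b) := by
  have h := PySem.Int.floordiv_mul_add_mod a b
  exact ⟨PySem.Int.floordiv a b, by linarith⟩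

lemma pymod_congr {a a' b : Int} (h : b ∣ (a - a')) : PySem.Int.mod a b = PySem.Int.mod a' b := by
  have d1 := pymod_sub_dvd a b
  have d2 := pymod_sub_dvd a' b
  have hd : b ∣ (PySem.Int.mod a b - PySem.Int.mod a' b) := by
    have e : PySem.Int.mod a b - PySem.Int.mod a' b
        = (a - a') - (a - PySem.Int.mod a b) + (a' - PySem.Int.mod a' b) := by ring
    rw [e]; exact (h.sub d1).add d2
  rcases lt_trichotomy b 0 with hb | hb | hb
  · have b1 := PySem.Int.mod_neg_bounds a hb
    have b2 := PySem.Int.mod_neg_bounds a' hb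
    have habs : |PySem.Int.mod a b - PySem.Int.mod a' b| < -b := abs_lt.mpr ⟨by omega, by omega⟩
    have := Int.eq_zero_of_abs_lt_dvd (neg_dvd.mpr hd) habs
    omega
  · subst hb
    have : a - a' = 0 := by exact zero_dvd_iff.mp h
    have ha : a = a' := by omega
    rw [ha]
  · have b1n := PySem.Int.mod_nonneg a hb
    have b1l := PySem.Int.mod_lt a hb
    have b2n := PySem.Int.mod_nonneg a' hb
    have b2l := PySem.Int.mod_lt a' hb
    have habs : |PySem.Int.mod a b - PySem.Int.mod a' b| < b := abs_lt.mpr ⟨by omega, by omega⟩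
    have := Int.eq_zero_of_abs_lt_dvd hd habs
    omega

lemma pymod_mod (a b : Int) : PySem.Int.mod (PySem.Int.mod a b) b = PySem.Int.mod a b := by
  apply pymod_congr
  have h := pymod_sub_dvd a b
  have e : PySem.Int.mod a b - a = -(a - PySem.Int.mod a b) := by ring
  rw [e]; exact dvd_neg.mpr h

lemma dvd_of_pymod_eq {a a' b : Int} (h : PySem.Int.mod a b = PySem.Int.mod a' b) : b ∣ (a - a') := by
  have d1 := pymod_sub_dvd a b
  have d2 := pymod_sub_dvd a' b
  have e : a - a' = (a - PySem.Int.mod a b) - (a' - PySem.Int.mod a' b) := by rw [h]; ring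
  rw [e]; exact d1.sub d2

lemma pymod_mul_sub (x y c N : Int) :
    PySem.Int.mod (PySem.Int.mod x N * PySem.Int.mod y N - c) N = PySem.Int.mod (x * y - c) N := by
  obtain ⟨qx, hx⟩ := pymod_sub_dvd x N
  obtain ⟨qy, hy⟩ := pymod_sub_dvd y N
  have hx' : PySem.Int.mod x N = x - N * qx := by linarith
  have hy' : PySem.Int.mod y N = y - N * qy := by linarith
  apply pymod_congr
  rw [hx', hy']
  exact ⟨N * qx * qy - qx * y - x * qy, by ring⟩

-- ------- Lucas doubling identities -------
lemma lucV_inv (p : Int) (n : Nat) :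
    lucV p (n + 1) * lucV p (n + 1) + lucV p n * lucV p n - p * lucV p n * lucV p (n + 1) = 4 - p * p := by
  induction n with
  | zero => simp [lucV]; ring
  | succ n ih => rw [lucV_step]; linear_combination ih

lemma lucV_double (p : Int) (k : Nat) :
    lucV p (2 * k) = lucV p k * lucV p k - 2 ∧
    lucV p (2 * k + 1) = lucV p k * lucV p (k + 1) - p := by
  induction k with
  | zero => exact ⟨by simp [lucV], by simp [lucV]; ring⟩
  | succ k ih =>
    obtain ⟨h1, h2⟩ := ih
    have inv := lucV_inv p k
    have e1 : 2 * (k + 1) = (2 * k) + 2 := by ring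
    have e2 : 2 * (k + 1) + 1 = (2 * k + 1) + 2 := by ring
    constructor
    · rw [e1, lucV_step, h2, h1]
      linear_combination -inv
    · have e3 : (2 * k + 1) + 1 = (2 * k) + 2 := by ring
      have e4 : k + 1 + 1 = k + 2 := rfl
      rw [e2, lucV_step, e3, lucV_step, h1, h2, e4, lucV_step]
      linear_combination (-p) * inv

-- ------- B's recursion computes mod-reduced Lucas values -------
lemma pvVV_eq (p N : Int) (k : Nat) :
    pvVV p N k = (PySem.Int.mod (lucV p k) N, PySem.Int.mod (lucV p (k + 1)) N) := by
  induction k using Nat.strong_induction_on with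
  | _ k ih =>
    match k with
    | 0 => simp [pvVV, lucV]
    | (k + 1) =>
      have hlt : (k + 1) / 2 < k + 1 := Nat.div_lt_self (Nat.succ_pos k) one_lt_two
      have ihj := ih _ hlt
      rw [pvVV]
      simp only [ihj]
      set j := (k + 1) / 2 with hj
      rcases Nat.mod_two_eq_zero_or_one (k + 1) with hm | hm
      · have hk1 : 2 * j = k + 1 := by omega
        rw [hm, if_neg (by omega)]
        rw [pymod_mul_sub, pymod_mul_sub, ← (lucV_double p j).1, ← (lucV_double p j).2, hk1]
      · have hk1 : 2 * j + 1 = k + 1 := by omega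
        have hk2 : 2 * (j + 1) = k + 1 + 1 := by omega
        rw [hm, if_pos rfl]
        rw [pymod_mul_sub, pymod_mul_sub, ← (lucV_double p j).2, ← (lucV_double p (j + 1)).1, hk1, hk2]

-- ------- lucW ≡ lucV mod N -------
lemma lucW_mod (p N : Int) (n : Nat) :
    PySem.Int.mod (lucW p N n) N = PySem.Int.mod (lucV p n) N := by
  induction n using Nat.strong_induction_on with
  | _ n ih =>
    match n with
    | 0 => rfl
    | 1 => rfl
    | (n + 2) =>
      have ih1 := ih (n + 1) (by omega)
      have ih2 := ih n (by omega)
      rw [lucW_step, lucV_step, pymod_mod]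
      apply pymod_congr
      have e : (p * lucW p N (n + 1) - lucW p N n) - (p * lucV p (n + 1) - lucV p n)
          = p * (lucW p N (n + 1) - lucV p (n + 1)) - (lucW p N n - lucV p n) := by ring
      rw [e]
      exact ((dvd_of_pymod_eq ih1).mul_left p).sub (dvd_of_pymod_eq ih2)

-- ------- Dict.erase lemmas (the prelude has none for erase) -------
lemma find?_filter_ne (l : List (Int × Int)) (k k' : Int) :
    List.find? (fun q => q.1 == k') (l.filter (fun q => !(q.1 == k)))
      = if k' = k then none else List.find? (fun q => q.1 == k') l := by
  induction l with
  | nil => simp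
  | cons x xs ih =>
    by_cases hk : k' = k
    · subst hk
      simp only [if_pos rfl] at ih ⊢
      by_cases h1 : x.1 = k'
      · simpa [List.filter_cons, h1] using ih
      · simpa [List.filter_cons, h1] using ih
    · simp only [if_neg hk] at ih ⊢
      by_cases h1 : x.1 = k
      · have hx' : ¬ (x.1 = k') := by rw [h1]; exact fun hh => hk hh.symm
        rw [List.filter_cons, if_neg (by simp [h1]), ih, List.find?_cons_of_neg (by simp [hx'])]
      · by_cases h2 : x.1 = k'
        · rw [List.filter_cons, if_pos (by simp [h1]), List.find?_cons_of_pos (by simp [h2]),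
            List.find?_cons_of_pos (by simp [h2])]
        · rw [List.filter_cons, if_pos (by simp [h1]), List.find?_cons_of_neg (by simp [h2]),
            List.find?_cons_of_neg (by simp [h2]), ih]

lemma dict_get?_erase (d : PySem.Dict Int Int) (k k' : Int) :
    (d.erase k).get? k' = if k' = k then none else d.get? k' := by
  rcases d with ⟨l⟩
  simp only [PySem.Dict.erase, PySem.Dict.get?, find?_filter_ne]
  split <;> rfl

lemma dict_contains_erase (d : PySem.Dict Int Int) (k k' : Int) :
    (d.erase k).contains k' = (decide (k' ≠ k) && d.contains k') := by
  rw [PySem.Dict.contains_eq_isSome_get?, dict_get?_erase, PySem.Dict.contains_eq_isSome_get?]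
  by_cases h : k' = k <;> simp [h]

lemma dict_getD_erase (d : PySem.Dict Int Int) (k k' v : Int) :
    (d.erase k).getD k' v = if k' = k then v else d.getD k' v := by
  rw [PySem.Dict.getD_eq_get?_getD, dict_get?_erase]
  by_cases h : k' = k <;> simp [h, PySem.Dict.getD_eq_get?_getD]

-- ------- the A-side loop -------
def pvD0 (p : Int) : PySem.Dict Int Int := (PySem.Dict.empty.insert 0 2).insert 1 p

def pvLoopA (p N : Int) (n : Nat) : PySem.Dict Int Int :=
  (List.range n).foldl (fun d (k : Nat) => pvBodyA p N d (k : Int)) (pvD0 p)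

-- invariant after processing i = 0 .. t  (t ≥ 1): which keys are present and what they hold
def pvInv (p N : Int) (t : Nat) (d : PySem.Dict Int Int) : Prop :=
  (∀ k : Int, d.contains k = true ↔ (0 ≤ k ∧ k ≤ (t : Int) ∧ (k = 0 ∨ (t : Int) - 3 < k))) ∧
  (∀ k : Nat, k ≤ t → (k = 0 ∨ (t : Int) - 3 < (k : Int)) → d.getD (k : Int) 0 = lucW p N k)

lemma pvInv_d0 (p N : Int) : pvInv p N 1 (pvD0 p) := by
  constructor
  · intro k
    simp [pvD0, PySem.Dict.contains_insert, PySem.Dict.contains_empty, beq_iff_eq]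
    omega
  · intro k hk _
    interval_cases k
    · simp [pvD0, PySem.Dict.getD_insert, lucW]
    · simp [pvD0, PySem.Dict.getD_insert, lucW]

lemma pvLoopA_two (p N : Int) : pvLoopA p N 2 = pvD0 p := by
  have h0 : (pvD0 p).contains 0 = true := by
    simp [pvD0, PySem.Dict.contains_insert, PySem.Dict.contains_empty]
  have h1 : (pvD0 p).contains 1 = true := by
    simp [pvD0, PySem.Dict.contains_insert, PySem.Dict.contains_empty]
  show pvBodyA p N (pvBodyA p N (pvD0 p) 0) 1 = pvD0 p
  unfold pvBodyA
  simp [h0, h1]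

lemma pvInv_step (p N : Int) (t : Nat) (d : PySem.Dict Int Int) (ht : 1 ≤ t) (h : pvInv p N t d) :
    pvInv p N (t + 1) (pvBodyA p N d ((t : Int) + 1)) := by
  obtain ⟨hc, hv⟩ := h
  have hnotin : d.contains ((t : Int) + 1) = false := by
    cases hb : d.contains ((t : Int) + 1) with
    | false => rfl
    | true => exact absurd ((hc _).mp hb) (by omega)
  -- values fed into the new entry
  have hgt : d.getD ((t : Int) + 1 - 1) 0 = lucW p N t := by
    have e : ((t : Int) + 1 - 1) = ((t : Nat) : Int) := by push_cast; ring
    rw [e]; exact hv t le_rfl (by omega)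
  have hgt1 : d.getD ((t : Int) + 1 - 2) 0 = lucW p N (t - 1) := by
    have e : ((t : Int) + 1 - 2) = ((t - 1 : Nat) : Int) := by omega
    rw [e]; exact hv (t - 1) (by omega) (by omega)
  have hw : PySem.Int.mod (p * d.getD ((t : Int) + 1 - 1) 0 - d.getD ((t : Int) + 1 - 2) 0) N
      = lucW p N (t + 1) := by
    rw [hgt, hgt1]
    have e1 : t - 1 + 2 = t + 1 := by omega
    have e2 : t - 1 + 1 = t := by omega
    rw [← e1, lucW_step, e2]
  unfold pvBodyA
  rw [hnotin]
  simp only [Bool.false_eq_true, if_false]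
  set w := PySem.Int.mod (p * d.getD ((t : Int) + 1 - 1) 0 - d.getD ((t : Int) + 1 - 2) 0) N
  by_cases h3 : 3 < (t : Int) + 1
  · -- erase branch: key (t+1)-3 = t-2 disappears
    rw [if_pos h3]
    constructor
    · intro k
      rw [dict_contains_erase, PySem.Dict.contains_insert]
      by_cases hk : k = (t : Int) + 1 - 3
      · simp [hk]; omega
      · cases hb : d.contains k with
        | false =>
          have hiff := hc k
          rw [hb] at hiff
          simp only [Bool.false_eq_true, false_iff] at hiff
          simp [hk, hb, beq_iff_eq]
          omega
        | true =>
          have hP := (hc k).mp hb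
          simp [hk, hb, beq_iff_eq]
          omega
    · intro k hk hcond
      rw [dict_getD_erase, PySem.Dict.getD_insert]
      have hne3 : ((k : Nat) : Int) ≠ (t : Int) + 1 - 3 := by omega
      rw [if_neg hne3]
      by_cases hkt : (k : Nat) = t + 1
      · rw [if_pos (by push_cast; omega), hw, hkt]
      · rw [if_neg (by push_cast; omega)]
        exact hv k (by omega) (by omega)
  · rw [if_neg h3]
    constructor
    · intro k
      rw [PySem.Dict.contains_insert]
      cases hb : d.contains k with
      | false =>
        have hiff := hc k
        rw [hb] at hiff
        simp only [Bool.false_eq_true, false_iff] at hiff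
        simp [hb, beq_iff_eq]
        omega
      | true =>
        have hP := (hc k).mp hb
        simp [hb, beq_iff_eq]
        omega
    · intro k hk hcond
      rw [PySem.Dict.getD_insert]
      by_cases hkt : (k : Nat) = t + 1
      · rw [if_pos (by push_cast; omega), hw, hkt]
      · rw [if_neg (by push_cast; omega)]
        exact hv k (by omega) (by omega)

lemma pvLoopA_succ (p N : Int) (n : Nat) :
    pvLoopA p N (n + 1) = pvBodyA p N (pvLoopA p N n) (n : Int) := by
  unfold pvLoopA
  rw [List.range_succ, List.foldl_append]
  rfl

lemma pvInv_all (p N : Int) (t : Nat) (ht : 1 ≤ t) : pvInv p N t (pvLoopA p N (t + 1)) := by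
  induction t with
  | zero => omega
  | succ t ih =>
    by_cases h1 : 1 ≤ t
    · rw [pvLoopA_succ]
      have hcast : ((t + 1 : Nat) : Int) = (t : Int) + 1 := by push_cast; ring
      rw [hcast]
      exact pvInv_step p N t _ h1 (ih h1)
    · have ht0 : t = 0 := by omega
      subst ht0
      rw [pvLoopA_two]
      exact pvInv_d0 p N

-- the loop A actually runs is pvLoopA
lemma suite_de_lucas_eq_loop (e p N : Int) (he : 0 ≤ e) :
    suite_de_lucas e p N = PySem.Int.mod ((pvLoopA p N (e.toNat + 1)).getD e 0) N := by
  unfold suite_de_lucas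
  simp only [PySem.List.pyRange_one, List.foldl_map, zero_add]
  rw [show (e + 1 - 0).toNat = e.toNat + 1 by omega]
  rfl

-- ===== VERDICT (by name: the statement is the Claim_ definition above) =====
theorem suite_de_lucas_spec : Claim_equal_suite_de_lucas := by
  intro e p N _hdom hpre
  obtain ⟨he, _hN⟩ := hpre
  unfold Spec_suite_de_lucas suite_de_lucas_alt
  rw [suite_de_lucas_eq_loop e p N he, pvVV_eq]
  rcases Nat.eq_zero_or_pos e.toNat with h0 | h1
  · -- e = 0: the loop body is a no-op on i = 0
    rw [h0]
    have he0 : e = 0 := by omega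
    subst he0
    have h0c : (pvD0 p).contains 0 = true := by
      simp [pvD0, PySem.Dict.contains_insert, PySem.Dict.contains_empty]
    have hl : pvLoopA p N 1 = pvD0 p := by
      show pvBodyA p N (pvD0 p) 0 = pvD0 p
      unfold pvBodyA
      simp [h0c]
    rw [show (0 : Nat) + 1 = 1 from rfl, hl]
    simp [pvD0, PySem.Dict.getD_insert, lucV]
  · have inv := pvInv_all p N e.toNat h1
    have hge : (e : Int) = ((e.toNat : Nat) : Int) := by omega
    have hval : (pvLoopA p N (e.toNat + 1)).getD e 0 = lucW p N e.toNat := by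
      rw [hge]
      exact inv.2 e.toNat le_rfl (by omega)
    rw [hval, lucW_mod]
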